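-- pv_equiv track=rewrite | github.com/LuKrO2011/code-readability-classifier | src/readability_classifier/encoders/bert_encoder.py | _calculate_segment_ids
-- ===== SOURCE A (Python) =====
-- def _calculate_segment_ids(input_ids: list[int], sep_token_id: int) -> list[int]:
--     """
--     Calculates the segment ids for the given code snippet.
--     The resulting segment embedding is made up of sentence indexes representing which
--     sentence every token is in. Each line is considered a sentence.
--     :param input_ids: The encoded lines of the code snippet.
--     :param: sep_token_id: The id of the separator token.
--     :return: The segment ids.
--     """
--     segment_ids = []
--
--     # Calculate the segment ids
--     line = 0
--     for token_id in input_ids: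
--         # Add the segment ids for the tokens
--         segment_ids.append(line)
--
--         # If the token is a separator token, increase the line number
--         if token_id == sep_token_id:
--             line += 1
--
--     return segment_ids
-- ===== SOURCE B (Python) =====
-- def _calculate_segment_ids(input_ids: list[int], sep_token_id: int) -> list[int]:
--     # Block construction: locate each separator with list.index and emit a
--     # constant block [seg] * block_length per segment, instead of a per-token counter.
--     out = []
--     seg = 0
--     rest = input_ids
--     while True:
--         try:
--             i = rest.index(sep_token_id)
--         except ValueError:
--             out.extend([seg] * len(rest))
--             return out
--         out.extend([seg] * (i + 1))
--         seg += 1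
--         rest = rest[i + 1:]
-- ===== Notes on version B (the rewrite author's own statement) =====
-- stated objective: alternative
-- what changed: Replaces A's per-token counter loop by block construction: repeatedly locate the next separator with list.index and emit a constant block [seg]*block_length per segment.
import Mathlib
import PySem

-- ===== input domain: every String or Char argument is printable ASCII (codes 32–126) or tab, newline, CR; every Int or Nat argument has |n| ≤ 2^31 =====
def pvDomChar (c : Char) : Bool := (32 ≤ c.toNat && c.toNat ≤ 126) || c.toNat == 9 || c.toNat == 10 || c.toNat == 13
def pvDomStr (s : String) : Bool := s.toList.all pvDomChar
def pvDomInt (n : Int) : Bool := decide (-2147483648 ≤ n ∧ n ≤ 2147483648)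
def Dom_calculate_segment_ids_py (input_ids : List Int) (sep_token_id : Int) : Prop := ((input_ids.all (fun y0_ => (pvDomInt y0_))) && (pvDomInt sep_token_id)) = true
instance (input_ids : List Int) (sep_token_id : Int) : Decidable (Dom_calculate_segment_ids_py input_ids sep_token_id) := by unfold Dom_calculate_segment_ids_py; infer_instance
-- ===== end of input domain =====

-- B replaces A's per-token counter loop by block construction: find each separator with list.index and emit constant blocks (alternative decomposition, same cost).


-- ===== PORT A =====
-- literal port of A: fold over input_ids carrying (segment_ids, line)
def calculate_segment_ids_py (input_ids : List Int) (sep_token_id : Int) : List Int :=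
  (input_ids.foldl
    (fun (st : List Int × Int) token_id =>
      (st.1 ++ [st.2], if token_id = sep_token_id then st.2 + 1 else st.2))
    ([], 0)).1

-- ===== PORT B =====
-- B's while loop: locate the next separator with list.index (PySem.List.index?);
-- ValueError (none) ends the loop; rest[i+1:] with i ≥ 0 is exactly List.drop (i+1).
def pvBlocks (sep : Int) (seg : Int) (rest : List Int) : List Int :=
  match h : PySem.List.index? rest sep with
  | none => List.replicate rest.length seg
  | some i => List.replicate (i + 1) seg ++ pvBlocks sep (seg + 1) (rest.drop (i + 1))
termination_by rest.length
decreasing_by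
  have hm : sep ∈ rest := (PySem.List.index?_isSome_iff rest sep).1 (by rw [h]; rfl)
  have : 0 < rest.length := List.length_pos_of_mem hm
  simp; omega

def calculate_segment_ids_py_alt (input_ids : List Int) (sep_token_id : Int) : List Int :=
  pvBlocks sep_token_id 0 input_ids

-- ===== PRECONDITION & SPEC =====
def Spec_calculate_segment_ids_py (input_ids : List Int) (sep_token_id : Int) (out : List Int) : Prop := out = calculate_segment_ids_py_alt input_ids sep_token_id
instance (input_ids : List Int) (sep_token_id : Int) (out : List Int) : Decidable (Spec_calculate_segment_ids_py input_ids sep_token_id out) := by unfold Spec_calculate_segment_ids_py; infer_instance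

-- ===== CLAIM (what is proved, stated in full; the proofs are below) =====
def Claim_equal_calculate_segment_ids_py : Prop := ∀ (input_ids : List Int) (sep_token_id : Int), Dom_calculate_segment_ids_py input_ids sep_token_id → Spec_calculate_segment_ids_py input_ids sep_token_id (calculate_segment_ids_py input_ids sep_token_id)

-- ===== LEMMAS AND PROOFS =====

-- natural recursion characterising A's loop
def pvSeg (sep : Int) : List Int → Int → List Int
  | [], _ => []
  | t :: ts, line => line :: pvSeg sep ts (if t = sep then line + 1 else line)

theorem pvFoldA (sep : Int) (xs : List Int) (acc : List Int) (line : Int) :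
    (xs.foldl
      (fun (st : List Int × Int) token_id =>
        (st.1 ++ [st.2], if token_id = sep then st.2 + 1 else st.2))
      (acc, line)).1 = acc ++ pvSeg sep xs line := by
  induction xs generalizing acc line with
  | nil => simp [pvSeg]
  | cons t ts ih =>
      simp only [List.foldl_cons, pvSeg, ih]
      simp

theorem pvSegNoSep (sep : Int) (xs : List Int) (hx : sep ∉ xs) (seg : Int) :
    pvSeg sep xs seg = List.replicate xs.length seg := by
  induction xs generalizing seg with
  | nil => simp [pvSeg]
  | cons t ts ih =>
      have ht : t ≠ sep := fun h => hx (h ▸ List.mem_cons_self ..)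
      simp [pvSeg, ht, ih (fun h => hx (List.mem_cons_of_mem _ h)), List.replicate_succ]

theorem pvSegSplit (sep : Int) (pre suf : List Int) (hp : sep ∉ pre) (seg : Int) :
    pvSeg sep (pre ++ sep :: suf) seg
      = List.replicate (pre.length + 1) seg ++ pvSeg sep suf (seg + 1) := by
  induction pre generalizing seg with
  | nil => simp [pvSeg, List.replicate_succ]
  | cons t ts ih =>
      have ht : t ≠ sep := fun h => hp (h ▸ List.mem_cons_self ..)
      have hts : sep ∉ ts := fun h => hp (List.mem_cons_of_mem _ h)
      simp [pvSeg, ht, ih hts, List.replicate_succ]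

theorem pvSegBlocks (sep : Int) (rest : List Int) (seg : Int) :
    pvSeg sep rest seg = pvBlocks sep seg rest := by
  refine pvBlocks.induct sep (fun seg rest => pvSeg sep rest seg = pvBlocks sep seg rest)
    ?_ ?_ seg rest
  · intro seg rest h
    rw [pvBlocks, h]
    exact pvSegNoSep _ _ ((PySem.List.index?_eq_none_iff _ _).1 h) _
  · intro seg rest i h ih
    rw [pvBlocks, h]
    show pvSeg sep rest seg
        = List.replicate (i + 1) seg ++ pvBlocks sep (seg + 1) (rest.drop (i + 1))
    obtain ⟨pre, suf, hrest, hlen, hnp⟩ := (PySem.List.index?_eq_some_iff _ _ _).1 h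
    have hdrop : rest.drop (i + 1) = suf := by
      subst hrest hlen; simp [List.drop_append]
    rw [hdrop] at ih
    rw [hrest, pvSegSplit sep pre suf hnp seg, hlen, ← hrest, hdrop, ih]

-- ===== VERDICT (by name: the statement is the Claim_ definition above) =====
theorem calculate_segment_ids_py_spec : Claim_equal_calculate_segment_ids_py := by
  intro input_ids sep_token_id _
  unfold Spec_calculate_segment_ids_py calculate_segment_ids_py calculate_segment_ids_py_alt
  rw [pvFoldA, List.nil_append, pvSegBlocks]
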